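-- pv_equiv track=rewrite | github.com/nikunjpanchal22/code_clone_classification | python_t4_full/Clone_1920.py | two_pair
-- ===== SOURCE A (Python) =====
-- def two_pair(ranks) :
-- 	unique_ranks = set(ranks)
-- 	pairs = []
-- 	for rank in unique_ranks :
-- 		if ranks.count(rank) == 2 :
-- 			pairs.append(rank)
--
-- 	if len(pairs) > 0 :
-- 		pairs.sort(reverse = True)
-- 		return tuple(pairs)
-- 	else :
-- 		return None
-- ===== SOURCE B (Python) =====
-- def two_pair(ranks):
--     s = sorted(ranks)
--     if not s:
--         return None
--     res = []
--     cur, cnt = s[0], 1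
--     for x in s[1:]:
--         if x == cur:
--             cnt += 1
--         else:
--             if cnt == 2:
--                 res = [cur] + res
--             cur, cnt = x, 1
--     if cnt == 2:
--         res = [cur] + res
--     return tuple(res) if res else None
-- ===== Notes on version B (the rewrite author's own statement) =====
-- stated objective: faster
-- what changed: Replaces the per-unique-value ranks.count rescans (quadratic) by one sort followed by a single run-length scan of the sorted list, prepending each exactly-twice value so the result comes out already in descending order.
import Mathlib
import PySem

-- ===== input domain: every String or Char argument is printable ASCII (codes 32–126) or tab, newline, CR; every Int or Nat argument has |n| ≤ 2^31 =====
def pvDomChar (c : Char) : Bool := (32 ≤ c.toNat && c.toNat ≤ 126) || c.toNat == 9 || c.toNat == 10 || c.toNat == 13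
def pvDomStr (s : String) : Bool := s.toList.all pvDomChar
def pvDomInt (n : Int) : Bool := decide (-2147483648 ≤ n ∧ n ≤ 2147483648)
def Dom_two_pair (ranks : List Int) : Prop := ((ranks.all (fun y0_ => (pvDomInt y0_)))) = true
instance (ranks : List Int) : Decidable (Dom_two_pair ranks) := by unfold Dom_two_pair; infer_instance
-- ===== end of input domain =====

-- B replaces A's per-unique-value count rescans by one sort plus a single run-length scan
-- that emits the exactly-twice values already in descending order (objective: faster).

-- ===== PORT A =====
def two_pair (ranks : List Int) : Option (List Int) :=
  let unique_ranks := PySem.Set.ofList ranks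
  let pairs := unique_ranks.foldl
    (fun acc rank => if PySem.List.count ranks rank = 2 then acc ++ [rank] else acc) []
  if pairs.length > 0 then
    some (PySem.List.sorted pairs (fun x => x) true)
  else
    none

-- ===== PORT B =====
-- the for-loop of Source B: state (cur, cnt, res); a run of length exactly 2 prepends its value
def twoPairScan (cur : Int) (cnt : Nat) (xs : List Int) (res : List Int) : List Int :=
  match xs with
  | [] => if cnt = 2 then cur :: res else res
  | x :: rest =>
      if x = cur then twoPairScan cur (cnt + 1) rest res
      else twoPairScan x 1 rest (if cnt = 2 then cur :: res else res)

def two_pair_alt (ranks : List Int) : Option (List Int) :=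
  match PySem.List.sorted ranks (fun x => x) false with
  | [] => none
  | x :: xs =>
      let res := twoPairScan x 1 xs []
      if res = [] then none else some res

-- ===== PRECONDITION & SPEC =====
def Spec_two_pair (ranks : List Int) (out : Option (List Int)) : Prop := out = two_pair_alt ranks
instance (ranks : List Int) (out : Option (List Int)) : Decidable (Spec_two_pair ranks out) := by unfold Spec_two_pair; infer_instance

-- ===== CLAIM (what is proved, stated in full; the proofs are below) =====
def Claim_equal_two_pair : Prop := ∀ (ranks : List Int), Dom_two_pair ranks → Spec_two_pair ranks (two_pair ranks)

-- ===== LEMMAS AND PROOFS =====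

lemma count_cons_fact (a b : Int) (l : List Int) :
    List.count a (b :: l) = List.count a l + if b = a then 1 else 0 := by
  simp [List.count_cons]

lemma scan_cons_eq (cur x : Int) (cnt : Nat) (rest acc : List Int) (h : x ≠ cur) :
    twoPairScan cur cnt (x :: rest) acc
      = twoPairScan x 1 rest (if cnt = 2 then cur :: acc else acc) := by
  simp [twoPairScan, h]

lemma scan_cons_eq' (cur : Int) (cnt : Nat) (rest acc : List Int) :
    twoPairScan cur cnt (cur :: rest) acc = twoPairScan cur (cnt + 1) rest acc := by
  simp [twoPairScan]

lemma scan_append (xs : List Int) : ∀ (cur : Int) (cnt : Nat) (acc : List Int),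
    twoPairScan cur cnt xs acc = twoPairScan cur cnt xs [] ++ acc := by
  induction xs with
  | nil => intro cur cnt acc; simp only [twoPairScan]; split_ifs <;> simp
  | cons x rest ih =>
      intro cur cnt acc
      by_cases h1 : x = cur
      · subst h1
        rw [scan_cons_eq', scan_cons_eq', ih x (cnt + 1) acc]
      · rw [scan_cons_eq cur x cnt rest acc h1, scan_cons_eq cur x cnt rest [] h1]
        by_cases h2 : cnt = 2
        · rw [if_pos h2, if_pos h2, ih x 1 (cur :: acc), ih x 1 [cur]]
          simp
        · rw [if_neg h2, if_neg h2]
          exact ih x 1 acc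

lemma scan_mem (xs : List Int) : ∀ (cur : Int) (cnt : Nat),
    xs.Pairwise (· ≤ ·) → (∀ x ∈ xs, cur ≤ x) →
    ∀ v, v ∈ twoPairScan cur cnt xs [] ↔
      (v = cur ∧ cnt + xs.count cur = 2) ∨ (v ∈ xs ∧ cur < v ∧ xs.count v = 2) := by
  induction xs with
  | nil =>
      intro cur cnt _ _ v
      simp only [twoPairScan]
      split_ifs with h <;> simp [h]
  | cons x rest ih =>
      intro cur cnt hp hb v
      have hrp : rest.Pairwise (· ≤ ·) := (List.pairwise_cons.mp hp).2
      have hxr : ∀ y ∈ rest, x ≤ y := (List.pairwise_cons.mp hp).1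
      by_cases h1 : x = cur
      · subst h1
        rw [scan_cons_eq', ih x (cnt + 1) hrp hxr v]
        constructor
        · rintro (⟨rfl, hc⟩ | ⟨hm, hlt, hc⟩)
          · exact Or.inl ⟨rfl, by rw [count_cons_fact, if_pos rfl]; omega⟩
          · refine Or.inr ⟨List.mem_cons_of_mem _ hm, hlt, ?_⟩
            rw [count_cons_fact, if_neg (ne_of_lt hlt)]; omega
        · rintro (⟨rfl, hc⟩ | ⟨hm, hlt, hc⟩)
          · rw [count_cons_fact, if_pos rfl] at hc
            exact Or.inl ⟨rfl, by omega⟩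
          · have hne : x ≠ v := ne_of_lt hlt
            have hm' : v ∈ rest := by
              rcases List.mem_cons.mp hm with h | h
              · exact absurd h.symm hne
              · exact h
            refine Or.inr ⟨hm', hlt, ?_⟩
            rw [count_cons_fact, if_neg hne] at hc
            omega
      · have hcx : cur < x := lt_of_le_of_ne (hb x List.mem_cons_self) (Ne.symm h1)
        rw [scan_cons_eq cur x cnt rest [] h1, scan_append]
        have hrest_cur0 : rest.count cur = 0 := by
          apply List.count_eq_zero.mpr
          intro hmem
          exact absurd (hxr cur hmem) (by omega)
        have hcnt0 : (x :: rest).count cur = 0 := by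
          rw [count_cons_fact, if_neg h1, hrest_cur0]
        rw [List.mem_append, ih x 1 hrp hxr v]
        constructor
        · rintro ((⟨rfl, hc⟩ | ⟨hm, hlt, hc⟩) | hmem)
          · refine Or.inr ⟨List.mem_cons_self, hcx, ?_⟩
            rw [count_cons_fact, if_pos rfl]; omega
          · refine Or.inr ⟨List.mem_cons_of_mem _ hm, by omega, ?_⟩
            rw [count_cons_fact, if_neg (ne_of_lt hlt)]; omega
          · by_cases hcc : cnt = 2
            · rw [if_pos hcc] at hmem
              have : v = cur := by simpa using hmem
              exact Or.inl ⟨this, by omega⟩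
            · rw [if_neg hcc] at hmem
              exact absurd hmem (List.not_mem_nil)
        · rintro (⟨rfl, hc⟩ | ⟨hm, hlt, hc⟩)
          · have hc2 : cnt = 2 := by omega
            rw [if_pos hc2]
            exact Or.inr List.mem_cons_self
          · rcases List.mem_cons.mp hm with rfl | hm'
            · rw [count_cons_fact, if_pos rfl] at hc
              exact Or.inl (Or.inl ⟨rfl, by omega⟩)
            · by_cases hvx : v = x
              · subst hvx
                rw [count_cons_fact, if_pos rfl] at hc
                exact Or.inl (Or.inl ⟨rfl, by omega⟩)
              · refine Or.inl (Or.inr ⟨hm', lt_of_le_of_ne (hxr v hm') (Ne.symm hvx), ?_⟩)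
                rw [count_cons_fact, if_neg (fun h => hvx h.symm)] at hc
                omega

lemma scan_pairwise (xs : List Int) : ∀ (cur : Int) (cnt : Nat),
    xs.Pairwise (· ≤ ·) → (∀ x ∈ xs, cur ≤ x) →
    (twoPairScan cur cnt xs []).Pairwise (· > ·) := by
  induction xs with
  | nil =>
      intro cur cnt _ _
      simp only [twoPairScan]
      split_ifs <;> simp
  | cons x rest ih =>
      intro cur cnt hp hb
      have hrp : rest.Pairwise (· ≤ ·) := (List.pairwise_cons.mp hp).2
      have hxr : ∀ y ∈ rest, x ≤ y := (List.pairwise_cons.mp hp).1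
      by_cases h1 : x = cur
      · subst h1
        rw [scan_cons_eq']
        exact ih x (cnt + 1) hrp hxr
      · have hcx : cur < x := lt_of_le_of_ne (hb x List.mem_cons_self) (Ne.symm h1)
        rw [scan_cons_eq cur x cnt rest [] h1, scan_append, List.pairwise_append]
        refine ⟨ih x 1 hrp hxr, ?_, ?_⟩
        · by_cases hc : cnt = 2 <;> simp [hc]
        · intro a ha b hbmem
          have hca : cur < a := by
            rcases (scan_mem rest x 1 hrp hxr a).mp ha with ⟨rfl, _⟩ | ⟨_, hlt, _⟩
            · exact hcx
            · omega
          have hbv : b = cur := by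
            by_cases hc : cnt = 2
            · rw [if_pos hc] at hbmem; simpa using hbmem
            · rw [if_neg hc] at hbmem; exact absurd hbmem (List.not_mem_nil)
          subst hbv
          exact hca

lemma pairsA_eq (ranks : List Int) :
    (PySem.Set.ofList ranks).foldl
      (fun acc rank => if PySem.List.count ranks rank = 2 then acc ++ [rank] else acc) [] =
    (PySem.Set.ofList ranks).filter (fun r => decide (PySem.List.count ranks r = 2)) := by
  have h := PySem.List.foldl_append_if (fun r => decide (PySem.List.count ranks r = 2)) id
    (PySem.Set.ofList ranks) []
  simpa using h

-- ===== VERDICT (by name: the statement is the Claim_ definition above) =====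
theorem two_pair_spec : Claim_equal_two_pair := by
  intro ranks _
  unfold Spec_two_pair two_pair two_pair_alt
  simp only [pairsA_eq]
  rcases hs : PySem.List.sorted ranks (fun x => x) false with _ | ⟨x, xs⟩
  · have : ranks = [] := (PySem.List.sorted_eq_nil_iff ranks (fun x => x) false).mp hs
    subst this
    simp [PySem.Set.ofList]
  · have hperm : (x :: xs).Perm ranks := hs ▸ PySem.List.sorted_perm ranks (fun x => x) false
    have hpw : (x :: xs).Pairwise (fun a b => a ≤ b) := by
      have := PySem.List.sorted_pairwise ranks (fun x => x)
      rw [hs] at this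
      exact this
    have hrp : xs.Pairwise (· ≤ ·) := (List.pairwise_cons.mp hpw).2
    have hxr : ∀ y ∈ xs, x ≤ y := (List.pairwise_cons.mp hpw).1
    set res := twoPairScan x 1 xs [] with hres
    set P := (PySem.Set.ofList ranks).filter (fun r => decide (PySem.List.count ranks r = 2))
      with hP
    have hcount : ∀ v : Int, ranks.count v = (x :: xs).count v :=
      fun v => (hperm.count_eq v).symm
    have hmemranks : ∀ v : Int, v ∈ ranks ↔ v ∈ x :: xs :=
      fun v => hperm.mem_iff.symm
    have hresmem : ∀ v, v ∈ res ↔ v ∈ ranks ∧ ranks.count v = 2 := by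
      intro v
      rw [hres, scan_mem xs x 1 hrp hxr v, hmemranks v, hcount v]
      constructor
      · rintro (⟨rfl, hc⟩ | ⟨hm, hlt, hc⟩)
        · exact ⟨List.mem_cons_self, by rw [count_cons_fact, if_pos rfl]; omega⟩
        · exact ⟨List.mem_cons_of_mem _ hm,
            by rw [count_cons_fact, if_neg (ne_of_lt hlt)]; omega⟩
      · rintro ⟨hm, hc⟩
        by_cases hvx : v = x
        · subst hvx
          rw [count_cons_fact, if_pos rfl] at hc
          exact Or.inl ⟨rfl, by omega⟩
        · have hm' : v ∈ xs := by
            rcases List.mem_cons.mp hm with h | h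
            · exact absurd h hvx
            · exact h
          refine Or.inr ⟨hm', lt_of_le_of_ne (hxr v hm') (Ne.symm hvx), ?_⟩
          rw [count_cons_fact, if_neg (fun h => hvx h.symm)] at hc
          omega
    have hPmem : ∀ v, v ∈ P ↔ v ∈ ranks ∧ ranks.count v = 2 := by
      intro v
      rw [hP]
      simp [List.mem_filter, PySem.Set.mem_ofList, PySem.List.count_eq]
    have hresnd : res.Nodup :=
      List.Pairwise.imp (fun h => ne_of_gt h) (scan_pairwise xs x 1 hrp hxr)
    have hPnd : P.Nodup := (PySem.Set.nodup_ofList ranks).filter _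
    have hpermPR : res.Perm P := by
      rw [List.perm_ext_iff_of_nodup hresnd hPnd]
      intro v
      rw [hresmem v, hPmem v]
    have hsorted : PySem.List.sorted P (fun x => x) true = res :=
      PySem.List.sorted_rev_eq_of_perm_of_pairwise_gt P res (fun x => x) hpermPR
        (scan_pairwise xs x 1 hrp hxr)
    have hempty : P = [] ↔ res = [] :=
      ⟨fun h => List.Perm.eq_nil (h ▸ hpermPR), fun h => List.Perm.eq_nil (h ▸ hpermPR).symm⟩
    by_cases hr : res = []
    · have hp0 : P = [] := hempty.mpr hr
      rw [hres] at hr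
      simp [hp0, hr]
    · have hp0 : P.length > 0 :=
        List.length_pos_of_ne_nil (fun h => hr (hempty.mp h))
      rw [hres] at hr
      rw [if_pos hp0, hsorted, hres]
      simp [hr]
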